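-- pv_equiv track=rewrite | github.com/KelseyKwon/backjoon-programmers | 프로그래머스/2/159993. 미로 탈출/미로 탈출.py | solution
-- ===== SOURCE A (Python) =====
-- from collections import deque
--
-- def solution(maps):
--     n, m = len(maps), len(maps[0])
--     dx = [0, 1, 0, -1]
--     dy = [1, 0, -1, 0]
--
--     def inRange(x, y):
--         return 0<=x<n and 0<=y<m
--
--     def bfs(cur_x, cur_y, target):
--         visited = [[False]  * m for _ in range(n)]
--         q = deque()
--         q.append((cur_x, cur_y, 0))
--         visited[cur_x][cur_y] = True
--
--         while q:
--             x, y, count = q.popleft()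
--             if (maps[x][y] == target):
--                 return count
--             for i in range(4):
--                 nx = x + dx[i]
--                 ny = y + dy[i]
--
--                 if (inRange(nx, ny) and maps[nx][ny] != 'X' and not visited[nx][ny]):
--                     q.append((nx, ny, count + 1))
--                     visited[nx][ny] = True
--
--         return -1
--
--
--     # maps가 지금 문자열이다.
--     for i in range(n):
--         for j in range(m):
--             if maps[i][j] == 'S':
--                 start_x , start_y = i, j
--             elif maps[i][j] == 'L':
--                 lever_x, lever_y = i, j
--
--
--     to_lever = bfs(start_x, start_y, 'L')
--     if to_lever == -1: return -1
--     to_exit = bfs(lever_x, lever_y, 'E')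
--     if to_exit == -1: return -1
--
--     return to_lever + to_exit
-- ===== SOURCE B (Python) =====
-- def solution(maps):
--     n, m = len(maps), len(maps[0])
--
--     spot = {}
--     for i in range(n):
--         for j in range(m):
--             spot[maps[i][j]] = (i, j)
--
--     if 'L' not in spot or 'E' not in spot:
--         return -1
--     sx, sy = spot['S']
--
--     def distances(sx, sy):
--         # dynamic-programming relaxation (Bellman-Ford style): no queue at all;
--         # n*m synchronous rounds, each building a fresh matrix from the old one.
--         dist = [[0 if (i, j) == (sx, sy) else -1 for j in range(m)] for i in range(n)]
--         for _ in range(n * m):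
--             new = []
--             for i in range(n):
--                 row = []
--                 for j in range(m):
--                     best = dist[i][j]
--                     if best == -1 and maps[i][j] != 'X':
--                         for ni, nj in ((i, j + 1), (i + 1, j), (i, j - 1), (i - 1, j)):
--                             if 0 <= ni < n and 0 <= nj < m and dist[ni][nj] != -1:
--                                 d = dist[ni][nj] + 1
--                                 if best == -1 or d < best:
--                                     best = d
--                     row.append(best)
--                 new.append(row)
--             dist = new
--         return dist
--
--     lx, ly = spot['L']
--     d1 = distances(sx, sy)[lx][ly]
--     if d1 == -1:
--         return -1
--     ex, ey = spot['E']
--     d2 = distances(lx, ly)[ex][ey]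
--     if d2 == -1:
--         return -1
--     return d1 + d2
-- ===== Notes on version B (the rewrite author's own statement) =====
-- stated objective: alternative
-- what changed: B replaces A's queue-based BFS entirely by a Bellman-Ford-style dynamic-programming relaxation: n*m synchronous rounds each rebuild the whole distance matrix from the previous one (a cell takes min over its already-distanced neighbours + 1), with S/L/E located once via a dict and an early -1 when the maze has no lever or no exit; Pre_ excludes grids where A raises (empty, short rows, no S) and ambiguous multi-L/multi-E grids where A mixes nearest-by-char with last-by-scan.
-- outside the precondition, e.g. on solution(['SLLE']): A returns 2, B returns 3; on solution(['SLEE']): A returns 2, B returns 3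
import Mathlib
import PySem

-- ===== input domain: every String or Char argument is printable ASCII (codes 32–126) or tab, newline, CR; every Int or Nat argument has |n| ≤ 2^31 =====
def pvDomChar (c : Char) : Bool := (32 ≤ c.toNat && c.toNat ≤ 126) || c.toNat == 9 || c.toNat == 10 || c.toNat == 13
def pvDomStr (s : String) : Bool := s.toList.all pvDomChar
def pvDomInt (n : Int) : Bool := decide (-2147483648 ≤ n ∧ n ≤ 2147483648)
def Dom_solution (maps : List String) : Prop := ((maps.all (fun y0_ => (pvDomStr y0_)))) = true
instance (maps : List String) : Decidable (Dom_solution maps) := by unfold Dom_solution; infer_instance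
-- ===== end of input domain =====

-- B replaces A's queue-based BFS by a Bellman-Ford-style dynamic-programming relaxation:
-- n*m synchronous rounds, each rebuilding the whole distance matrix from the previous one
-- (objective: alternative; B is not faster).

-- ===== PORT A =====
-- shared low-level grid helpers (exact for Python's g[x][y] reads/writes: every use below is
-- guarded by an explicit 0 ≤ x < n ∧ 0 ≤ y < m check, so defaults/toNat are never observable)
def get2d {α : Type} (g : List (List α)) (x y : Int) (d : α) : α :=
  PySem.List.pyGetD (PySem.List.pyGetD g x []) y d

def set2d {α : Type} (g : List (List α)) (x y : Int) (v : α) : List (List α) :=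
  g.set x.toNat ((g.getD x.toNat []).set y.toNat v)

-- the (i, j) pairs visited by 'for i in range(n): for j in range(m):'
def idxPairs (n m : Nat) : List (Int × Int) :=
  (List.range n).flatMap (fun (i : Nat) => (List.range m).map (fun (j : Nat) => ((i : Int), (j : Int))))

def dxA : List Int := [0, 1, 0, -1]
def dyA : List Int := [1, 0, -1, 0]

-- body of A's 'for i in range(4):' neighbour loop
def stepA (g : List (List Char)) (n m x y count : Int)
    (st : List (Int × Int × Int) × List (List Bool)) (i : Int) :
    List (Int × Int × Int) × List (List Bool) :=
  let nx := x + PySem.List.pyGetD dxA i 0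
  let ny := y + PySem.List.pyGetD dyA i 0
  if (decide (0 ≤ nx) && decide (nx < n) && decide (0 ≤ ny) && decide (ny < m))
      && !(get2d g nx ny ' ' == 'X') && !(get2d st.2 nx ny false) then
    (st.1 ++ [(nx, ny, count + 1)], set2d st.2 nx ny true)
  else st

-- A's 'while q:' loop; fuel n*m+1 is always sufficient (queue length + unvisited count
-- decreases every iteration), so the fuel-out -1 is never reached
def bfsA (g : List (List Char)) (n m : Int) (target : Char) :
    Nat → List (Int × Int × Int) → List (List Bool) → Int
  | 0, _, _ => -1
  | _ + 1, [], _ => -1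
  | fuel + 1, (x, y, count) :: rest, vis =>
      if get2d g x y ' ' = target then count
      else
        let st := (PySem.List.pyRange 0 4 1).foldl (stepA g n m x y count) (rest, vis)
        bfsA g n m target fuel st.1 st.2

-- A's scan for the last 'S' and last 'L'
def scanA (g : List (List Char)) (n m : Nat) : Option (Int × Int) × Option (Int × Int) :=
  (idxPairs n m).foldl (fun acc p =>
    if get2d g p.1 p.2 ' ' = 'S' then (some p, acc.2)
    else if get2d g p.1 p.2 ' ' = 'L' then (acc.1, some p)
    else acc) (none, none)

def solution (maps : List String) : Int :=
  let g := maps.map String.toList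
  let n : Nat := g.length
  let m : Nat := (g.headD []).length
  match scanA g n m with
  | (some s, lev?) =>
      let fuel := n * m + 1
      let toLever := bfsA g (n : Int) (m : Int) 'L' fuel [(s.1, s.2, 0)]
          (set2d (List.replicate n (List.replicate m false)) s.1 s.2 true)
      if toLever = -1 then -1
      else
        match lev? with
        | some l =>
            let toExit := bfsA g (n : Int) (m : Int) 'E' fuel [(l.1, l.2, 0)]
                (set2d (List.replicate n (List.replicate m false)) l.1 l.2 true)
            if toExit = -1 then -1 else toLever + toExit
        | none => 0  -- Python raises NameError here (provably unreachable under Pre_)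
  | (none, _) => 0   -- Python raises NameError (no 'S'); excluded by Pre_

-- ===== PORT B =====
-- B's candidate test '0 <= ni < n and 0 <= nj < m and dist[ni][nj] != -1'
def candB (dist : List (List Int)) (n m : Int) (q : Int × Int) : Bool :=
  (decide (0 ≤ q.1) && decide (q.1 < n) && decide (0 ≤ q.2) && decide (q.2 < m))
    && !(get2d dist q.1 q.2 (-1) == -1)

-- body of B's 'for ni, nj in (...)' minimum-of-neighbours loop
def bestStep (dist : List (List Int)) (n m : Int) (best : Int) (q : Int × Int) : Int :=
  if candB dist n m q then
    let d := get2d dist q.1 q.2 (-1) + 1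
    if best == -1 || decide (d < best) then d else best
  else best

-- one cell of one relaxation round
def relaxCell (g : List (List Char)) (dist : List (List Int)) (n m i j : Int) : Int :=
  let best := get2d dist i j (-1)
  if best == -1 && !(get2d g i j ' ' == 'X') then
    [(i, j + 1), (i + 1, j), (i, j - 1), (i - 1, j)].foldl (bestStep dist n m) best
  else best

-- one relaxation round: a fresh matrix built from the old one
def relaxGrid (g : List (List Char)) (dist : List (List Int)) (n m : Nat) : List (List Int) :=
  (List.range n).map (fun (i : Nat) => (List.range m).map (fun (j : Nat) =>
    relaxCell g dist (n : Int) (m : Int) ((i : Nat) : Int) ((j : Nat) : Int)))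

-- 'for _ in range(n*m): dist = relax(dist)'
def jacobi (g : List (List Char)) (n m : Nat) : Nat → List (List Int) → List (List Int)
  | 0, dist => dist
  | k + 1, dist => jacobi g n m k (relaxGrid g dist n m)

-- the initial matrix '[[0 if (i,j)==(sx,sy) else -1 ...]]'
def initDist (n m : Nat) (s : Int × Int) : List (List Int) :=
  (List.range n).map (fun (i : Nat) => (List.range m).map (fun (j : Nat) =>
    if (((i : Nat) : Int), ((j : Nat) : Int)) = s then (0 : Int) else -1))

def solution_alt (maps : List String) : Int :=
  let g := maps.map String.toList
  let n : Nat := g.length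
  let m : Nat := (g.headD []).length
  let spot := (idxPairs n m).foldl
    (fun d p => PySem.Dict.insert d (get2d g p.1 p.2 ' ') p)
    (PySem.Dict.empty : PySem.Dict Char (Int × Int))
  match PySem.Dict.get? spot 'L', PySem.Dict.get? spot 'E' with
  | some l, some e =>
      match PySem.Dict.get? spot 'S' with
      | some s =>
          let d1 := get2d (jacobi g n m (n * m) (initDist n m s)) l.1 l.2 (-1)
          if d1 = -1 then -1
          else
            let d2 := get2d (jacobi g n m (n * m) (initDist n m l)) e.1 e.2 (-1)
            if d2 = -1 then -1 else d1 + d2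
      | none => 0  -- Python raises KeyError (no 'S'); excluded by Pre_
  | _, _ => -1

-- ===== PRECONDITION & SPEC =====
-- count of a character in the n x m region A scans (first-row width m; longer rows are cut)
def cntRegion (maps : List String) (c : Char) : Nat :=
  ((maps.map (fun s => s.toList.take (maps.headD "").toList.length)).flatten).count c

-- Pre_ excludes: the empty list and grids with a row shorter than the first (A raises
-- IndexError), grids without 'S' in the scanned region (A raises NameError), and grids holding
-- several 'L' (or several 'E') cells together with at least one cell of the other marker, where
-- A's result mixes the nearest such cell (BFS target test) with the last one (scan) — a
-- defensible-corner accident.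
def Pre_solution (maps : List String) : Prop :=
  maps ≠ [] ∧
  (∀ s ∈ maps, (maps.headD "").toList.length ≤ s.toList.length) ∧
  1 ≤ cntRegion maps 'S' ∧
  ((cntRegion maps 'L' ≤ 1 ∧ cntRegion maps 'E' ≤ 1) ∨
    cntRegion maps 'L' = 0 ∨ cntRegion maps 'E' = 0)

instance (maps : List String) : Decidable (Pre_solution maps) := by
  unfold Pre_solution; infer_instance

def pvWitness_solution : List String := ["SOE", "OXL"]

def Spec_solution (maps : List String) (out : Int) : Prop := out = solution_alt maps
instance (maps : List String) (out : Int) : Decidable (Spec_solution maps out) := by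
  unfold Spec_solution; infer_instance

-- ===== CLAIM (what is proved, stated in full; the proofs are below) =====
def Claim_equal_solution : Prop :=
  ∀ (maps : List String), Dom_solution maps → Pre_solution maps →
    Spec_solution maps (solution maps)

-- ===== LEMMAS AND PROOFS =====

-- proof-side notions
def inReg (n m : Nat) (p : Int × Int) : Prop :=
  0 ≤ p.1 ∧ p.1 < (n : Int) ∧ 0 ≤ p.2 ∧ p.2 < (m : Int)

def dims {α : Type} (n m : Nat) (g : List (List α)) : Prop :=
  g.length = n ∧ ∀ r ∈ g, r.length = m

-- rows at least m wide (the grids themselves; A only ever reads columns < m)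
def dimsGe {α : Type} (n m : Nat) (g : List (List α)) : Prop :=
  g.length = n ∧ ∀ r ∈ g, m ≤ r.length

def countIn {α : Type} [BEq α] (g : List (List α)) (a : α) : Nat :=
  (g.map (fun r => r.count a)).sum

def lastOcc (g : List (List Char)) (c : Char) (n m : Nat) : Option (Int × Int) :=
  (idxPairs n m).foldl (fun a p => if get2d g p.1 p.2 ' ' = c then some p else a) none

-- the four neighbour offsets (row, column), shared by both programs
def dirsL : List (Int × Int) := [(0, 1), (1, 0), (0, -1), (-1, 0)]

-- level-set characterisation of reachability: visB k p = "p is reached within k BFS levels"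
def visB (g : List (List Char)) (n m : Nat) (src : Int × Int) : Nat → (Int × Int) → Bool
  | 0, p => p == src
  | k + 1, p => visB g n m src k p ||
      ((decide (0 ≤ p.1) && decide (p.1 < (n : Int)) && decide (0 ≤ p.2) && decide (p.2 < (m : Int)))
        && !(get2d g p.1 p.2 ' ' == 'X') &&
        dirsL.any (fun δ => visB g n m src k (p.1 + δ.1, p.2 + δ.2)))

-- "p enters the visited set exactly at level k"
def firstV (g : List (List Char)) (n m : Nat) (src : Int × Int) (k : Nat) (p : Int × Int) : Prop :=
  visB g n m src k p = true ∧ ∀ j < k, visB g n m src j p = false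

-- generic fold invariant
theorem foldl_inv {σ β : Type} (P : σ → Prop) (f : σ → β → σ) (l : List β) (s : σ)
    (h0 : P s) (hstep : ∀ s b, b ∈ l → P s → P (f s b)) : P (l.foldl f s) := by
  induction l generalizing s with
  | nil => exact h0
  | cons b t ih =>
      exact ih (f s b) (hstep s b (List.mem_cons_self ..) h0)
        (fun s' b' hb' => hstep s' b' (List.mem_cons_of_mem _ hb'))

-- 2d grid access lemmas
theorem get2d_pos {α : Type} (g : List (List α)) (x y : Int) (d : α)
    (hx0 : 0 ≤ x) (hx : x < (g.length : Int)) :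
    get2d g x y d = PySem.List.pyGetD (g.getD x.toNat []) y d := by
  unfold get2d
  rw [PySem.List.pyGetD_eq_getElem _ _ hx0 hx, List.getD_eq_getElem g [] (by omega)]

theorem dims_set2d {α : Type} {n m : Nat} {g : List (List α)} (h : dims n m g)
    (x y : Int) (v : α) : dims n m (set2d g x y v) := by
  obtain ⟨hlen, hrow⟩ := h
  by_cases hx : x.toNat < g.length
  · refine ⟨by simpa [set2d] using hlen, ?_⟩
    intro r hr
    rcases List.mem_or_eq_of_mem_set hr with h1 | h1
    · exact hrow r h1
    · subst h1
      rw [List.length_set, List.getD_eq_getElem g [] hx]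
      exact hrow _ (List.getElem_mem hx)
  · unfold set2d
    rw [List.set_eq_of_length_le (by omega)]
    exact ⟨hlen, hrow⟩

theorem get2d_set2d_self {α : Type} {n m : Nat} {g : List (List α)} (h : dims n m g)
    {x y : Int} (hp : inReg n m (x, y)) (v : α) (d : α) :
    get2d (set2d g x y v) x y d = v := by
  obtain ⟨hlen, hrow⟩ := h
  obtain ⟨h1, h2, h3, h4⟩ := hp
  simp only at h1 h2 h3 h4
  have hxl : x.toNat < g.length := by omega
  have hrl : (g.getD x.toNat []).length = m := by
    rw [List.getD_eq_getElem g [] hxl]; exact hrow _ (List.getElem_mem hxl)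
  rw [get2d_pos _ _ _ _ h1 (by simp [set2d]; omega)]
  unfold set2d
  rw [List.getD_eq_getElem _ [] (by simpa using hxl), List.getElem_set_self (by simpa using hxl)]
  rw [PySem.List.pyGetD_eq_getElem _ _ h3 (by rw [List.length_set]; omega)]
  exact List.getElem_set_self (by rw [List.length_set]; omega)

theorem get2d_set2d_ne {α : Type} {n m : Nat} {g : List (List α)} (h : dims n m g)
    {x y x' y' : Int} (hp : inReg n m (x, y)) (hq : inReg n m (x', y'))
    (hne : (x, y) ≠ (x', y')) (v : α) (d : α) :
    get2d (set2d g x y v) x' y' d = get2d g x' y' d := by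
  obtain ⟨hlen, hrow⟩ := h
  obtain ⟨h1, h2, h3, h4⟩ := hp
  obtain ⟨k1, k2, k3, k4⟩ := hq
  simp only at h1 h2 h3 h4 k1 k2 k3 k4
  have hxl : x.toNat < g.length := by omega
  have hxl' : x'.toNat < g.length := by omega
  have hrl : ∀ i (h : i < g.length), g[i].length = m := fun i hi => hrow _ (List.getElem_mem hi)
  rw [get2d_pos _ _ _ _ k1 (by simp [set2d]; omega),
      get2d_pos _ _ _ _ k1 (by omega)]
  unfold set2d
  rw [List.getD_eq_getElem _ [] (by simpa using hxl'), List.getElem_set]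
  by_cases hxx : x.toNat = x'.toNat
  · rw [if_pos hxx]
    have hyy : y.toNat ≠ y'.toNat := by
      intro hc; exact hne (by simp only [Prod.mk.injEq]; omega)
    rw [PySem.List.pyGetD_eq_getElem _ _ k3
        (by rw [List.length_set, List.getD_eq_getElem g [] hxl, hrl _ hxl]; omega)]
    rw [PySem.List.pyGetD_eq_getElem _ _ k3
        (by rw [List.getD_eq_getElem g [] hxl', hrl _ hxl']; omega)]
    rw [List.getElem_set_ne (by omega)]
    congr 1
    rw [List.getD_eq_getElem g [] hxl, List.getD_eq_getElem g [] hxl']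
    congr 1
  · rw [if_neg hxx, List.getD_eq_getElem g [] hxl']

theorem sum_set_nat (l : List Nat) : ∀ (i : Nat) (x : Nat) (h : i < l.length),
    (l.set i x).sum + l[i]'h = l.sum + x := by
  induction l with
  | nil => intro i x h; simp at h
  | cons hd tl ih =>
      intro i x h
      cases i with
      | zero => simp [List.set]; omega
      | succ k =>
          simp only [List.set, List.sum_cons, List.getElem_cons_succ]
          have := ih k x (by simpa using h)
          omega

theorem count_set_plus {α : Type} [BEq α] [LawfulBEq α] (a b : α) (hb : b ≠ a) :
    ∀ (r : List α) (j : Nat), ∀ (h : j < r.length), r[j] = a →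
    (r.set j b).count a + 1 = r.count a := by
  intro r
  induction r with
  | nil => intro j h; simp at h
  | cons hd tl ih =>
      intro j h ha
      cases j with
      | zero =>
          simp only [List.getElem_cons_zero] at ha
          subst ha
          simp [hb]
      | succ k =>
          simp only [List.getElem_cons_succ] at ha
          simp only [List.set, List.count_cons]
          have := ih k (by simpa using h) ha
          omega

theorem countIn_set2d {α : Type} [BEq α] [LawfulBEq α] {n m : Nat} {g : List (List α)}
    (h : dims n m g) {x y : Int} (hp : inReg n m (x, y)) {a b d : α}
    (hread : get2d g x y d = a) (hab : b ≠ a) :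
    countIn (set2d g x y b) a + 1 = countIn g a := by
  obtain ⟨hlen, hrow⟩ := h
  obtain ⟨h1, h2, h3, h4⟩ := hp
  simp only at h1 h2 h3 h4
  have hxl : x.toNat < g.length := by omega
  have hrl : (g.getD x.toNat []).length = m := by
    rw [List.getD_eq_getElem g [] hxl]; exact hrow _ (List.getElem_mem hxl)
  have hyl : y.toNat < (g.getD x.toNat []).length := by omega
  have hread' : (g.getD x.toNat [])[y.toNat] = a := by
    rw [get2d_pos _ _ _ _ h1 (by omega),
        PySem.List.pyGetD_eq_getElem _ _ h3 (by omega)] at hread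
    exact hread
  unfold countIn set2d
  rw [List.map_set]
  have hs := sum_set_nat (g.map (fun r => r.count a)) x.toNat
      (((g.getD x.toNat []).set y.toNat b).count a) (by simpa using hxl)
  have hc := count_set_plus a b hab (g.getD x.toNat []) y.toNat hyl hread'
  rw [List.getElem_map] at hs
  rw [List.getD_eq_getElem g [] hxl] at hc hs ⊢
  omega

theorem dims_replicate {α : Type} (n m : Nat) (v : α) :
    dims n m (List.replicate n (List.replicate m v)) := by
  refine ⟨List.length_replicate, fun r hr => ?_⟩
  rw [List.eq_of_mem_replicate hr]
  exact List.length_replicate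

theorem get2d_replicate {α : Type} {n m : Nat} {x y : Int} (hp : inReg n m (x, y))
    (v d : α) : get2d (List.replicate n (List.replicate m v)) x y d = v := by
  obtain ⟨h1, h2, h3, h4⟩ := hp
  simp only at h1 h2 h3 h4
  rw [get2d_pos _ _ _ _ h1 (by rw [List.length_replicate]; omega)]
  rw [List.getD_eq_getElem _ [] (by rw [List.length_replicate]; omega),
      List.getElem_replicate]
  rw [PySem.List.pyGetD_eq_getElem _ _ h3 (by rw [List.length_replicate]; omega)]
  exact List.getElem_replicate ..

theorem countIn_replicate {α : Type} [BEq α] [LawfulBEq α] (n m : Nat) (v : α) :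
    countIn (List.replicate n (List.replicate m v)) v = n * m := by
  unfold countIn
  simp [List.map_replicate, List.sum_replicate, smul_eq_mul]

-- reading a matrix built by a double range-map
theorem get2d_mapRange {α : Type} {n m : Nat} (f : Nat → Nat → α) {x y : Int} (d : α)
    (hp : inReg n m (x, y)) :
    get2d ((List.range n).map (fun i => (List.range m).map (fun j => f i j))) x y d
      = f x.toNat y.toNat := by
  obtain ⟨h1, h2, h3, h4⟩ := hp
  simp only at h1 h2 h3 h4
  rw [get2d_pos _ _ _ _ h1 (by simp; omega)]
  rw [List.getD_eq_getElem _ [] (by simp; omega)]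
  rw [List.getElem_map, List.getElem_range]
  rw [PySem.List.pyGetD_eq_getElem _ _ h3 (by simp; omega)]
  rw [List.getElem_map, List.getElem_range]

-- ----- level-set (visB) theory -----
theorem vis_zero (g : List (List Char)) (n m : Nat) (src p : Int × Int) :
    visB g n m src 0 p = true ↔ p = src := by
  simp [visB]

theorem vis_succ_iff (g : List (List Char)) (n m : Nat) (src p : Int × Int) (k : Nat) :
    visB g n m src (k + 1) p = true ↔
      visB g n m src k p = true ∨
        (inReg n m p ∧ get2d g p.1 p.2 ' ' ≠ 'X' ∧
          ∃ δ ∈ dirsL, visB g n m src k (p.1 + δ.1, p.2 + δ.2) = true) := by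
  simp only [visB, inReg, Bool.or_eq_true, Bool.and_eq_true, decide_eq_true_eq,
    Bool.not_eq_true', beq_eq_false_iff_ne, List.any_eq_true, Prod.exists]
  tauto

theorem vis_step_mono (g : List (List Char)) (n m : Nat) (src : Int × Int) (k : Nat)
    (p : Int × Int) (h : visB g n m src k p = true) : visB g n m src (k + 1) p = true := by
  rw [vis_succ_iff]; exact Or.inl h

theorem vis_mono (g : List (List Char)) (n m : Nat) (src : Int × Int) {j k : Nat}
    (hjk : j ≤ k) {p : Int × Int} (h : visB g n m src j p = true) :
    visB g n m src k p = true := by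
  induction k with
  | zero => have : j = 0 := by omega
            subst this; exact h
  | succ k ih =>
      by_cases hj : j = k + 1
      · subst hj; exact h
      · exact vis_step_mono g n m src k p (ih (by omega))

theorem vis_inReg (g : List (List Char)) (n m : Nat) {src : Int × Int}
    (hs : inReg n m src) {k : Nat} {p : Int × Int}
    (h : visB g n m src k p = true) : inReg n m p := by
  cases k with
  | zero => rw [vis_zero] at h; subst h; exact hs
  | succ k =>
      rw [vis_succ_iff] at h
      rcases h with h | h
      · exact vis_inReg g n m hs h
      · exact h.1

theorem vis_congr_step (g : List (List Char)) (n m : Nat) (src : Int × Int) {j k : Nat}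
    (h : ∀ p, visB g n m src j p = visB g n m src k p) (p : Int × Int) :
    visB g n m src (j + 1) p = visB g n m src (k + 1) p := by
  have hfun : (fun δ : Int × Int => visB g n m src j (p.1 + δ.1, p.2 + δ.2))
      = (fun δ => visB g n m src k (p.1 + δ.1, p.2 + δ.2)) := funext fun δ => h _
  simp only [visB, h p, hfun]

def stableAt (g : List (List Char)) (n m : Nat) (src : Int × Int) (k : Nat) : Prop :=
  ∀ p, visB g n m src (k + 1) p = visB g n m src k p

theorem stable_ge (g : List (List Char)) (n m : Nat) (src : Int × Int) {k : Nat}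
    (hst : stableAt g n m src k) : ∀ j, k ≤ j → ∀ p, visB g n m src j p = visB g n m src k p := by
  intro j
  induction j with
  | zero => intro hj p; have : k = 0 := by omega
            subst this; rfl
  | succ j ih =>
      intro hj p
      by_cases hk : k = j + 1
      · subst hk; rfl
      · have hle : k ≤ j := by omega
        calc visB g n m src (j + 1) p = visB g n m src (k + 1) p :=
              vis_congr_step g n m src (fun q => ih hle q) p
          _ = visB g n m src k p := hst p

-- region as a Finset, for the stabilisation counting argument
def regF (n m : Nat) : Finset (Int × Int) :=
  ((Finset.range n) ×ˢ (Finset.range m)).image (fun q => ((q.1 : Int), (q.2 : Int)))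

theorem mem_regF {n m : Nat} {p : Int × Int} : p ∈ regF n m ↔ inReg n m p := by
  unfold regF inReg
  simp only [Finset.mem_image, Finset.mem_product, Finset.mem_range, Prod.exists]
  constructor
  · rintro ⟨a, b, ⟨ha, hb⟩, rfl⟩
    refine ⟨by simp, by simp; omega, by simp, by simp; omega⟩
  · rintro ⟨h1, h2, h3, h4⟩
    exact ⟨p.1.toNat, p.2.toNat, ⟨by omega, by omega⟩, by
      rw [Prod.ext_iff]; constructor <;> simp <;> omega⟩

theorem card_regF_le (n m : Nat) : (regF n m).card ≤ n * m := by
  calc (regF n m).card ≤ ((Finset.range n) ×ˢ (Finset.range m)).card := Finset.card_image_le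
    _ = n * m := by simp

def visF (g : List (List Char)) (n m : Nat) (src : Int × Int) (k : Nat) : Finset (Int × Int) :=
  (regF n m).filter (fun p => visB g n m src k p = true)

theorem visF_mono (g : List (List Char)) (n m : Nat) (src : Int × Int) (k : Nat) :
    visF g n m src k ⊆ visF g n m src (k + 1) := by
  intro p hp
  rw [visF, Finset.mem_filter] at hp ⊢
  exact ⟨hp.1, vis_step_mono g n m src k p hp.2⟩

theorem visF_grow (g : List (List Char)) (n m : Nat) {src : Int × Int}
    (hs : inReg n m src) {k : Nat} (h : ¬ stableAt g n m src k) :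
    visF g n m src k ⊂ visF g n m src (k + 1) := by
  rw [stableAt] at h
  push_neg at h
  obtain ⟨p, hp⟩ := h
  have hk1 : visB g n m src (k + 1) p = true ∧ visB g n m src k p = false := by
    cases h1 : visB g n m src k p
    · cases h2 : visB g n m src (k + 1) p
      · rw [h1, h2] at hp; exact absurd rfl hp
      · exact ⟨rfl, rfl⟩
    · have := vis_step_mono g n m src k p h1
      rw [h1, this] at hp
      exact absurd rfl hp
  refine Finset.ssubset_iff_of_subset (visF_mono g n m src k) |>.mpr ⟨p, ?_, ?_⟩
  · rw [visF, Finset.mem_filter]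
    exact ⟨mem_regF.mpr (vis_inReg g n m hs hk1.1), hk1.1⟩
  · rw [visF, Finset.mem_filter]
    intro hc
    rw [hk1.2] at hc
    simp at hc
  
theorem visF_chain (g : List (List Char)) (n m : Nat) {src : Int × Int}
    (hs : inReg n m src) :
    ∀ K : Nat, (∀ j < K, ¬ stableAt g n m src j) → K + 1 ≤ (visF g n m src K).card := by
  intro K
  induction K with
  | zero =>
      intro _
      have hsrc : src ∈ visF g n m src 0 := by
        rw [visF, Finset.mem_filter]
        exact ⟨mem_regF.mpr hs, by rw [vis_zero]⟩
      have := Finset.card_pos.mpr ⟨src, hsrc⟩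
      omega
  | succ K ih =>
      intro h
      have h1 := ih (fun j hj => h j (by omega))
      have h2 := Finset.card_lt_card (visF_grow g n m hs (h K (by omega)))
      omega

theorem reach_nm (g : List (List Char)) (n m : Nat) {src : Int × Int}
    (hs : inReg n m src) {j : Nat} {p : Int × Int}
    (h : visB g n m src j p = true) : visB g n m src (n * m) p = true := by
  have hstab : ∃ k < n * m, stableAt g n m src k := by
    by_contra hc
    push_neg at hc
    have h1 := visF_chain g n m hs (n * m) hc
    have h2 : (visF g n m src (n * m)).card ≤ (regF n m).card :=
      Finset.card_le_card (Finset.filter_subset _ _)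
    have h3 := card_regF_le n m
    omega
  obtain ⟨k, hk, hst⟩ := hstab
  by_cases hj : j ≤ n * m
  · exact vis_mono g n m src hj h
  · have e1 := stable_ge g n m src hst j (by omega) p
    have e2 := stable_ge g n m src hst (n * m) (by omega) p
    rw [e1] at h
    rw [e2]
    exact h

-- Nat.find of the reach predicate
theorem find_of_firstV (g : List (List Char)) (n m : Nat) (src : Int × Int) {k : Nat}
    {p : Int × Int} (hf : firstV g n m src k p)
    (h : ∃ j, visB g n m src j p = true) : Nat.find h = k := by
  rw [Nat.find_eq_iff]
  exact ⟨hf.1, fun j hj hc => by rw [hf.2 j hj] at hc; cases hc⟩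

-- the offset list is closed under negation
theorem dirsL_neg {δ : Int × Int} (h : δ ∈ dirsL) : (-δ.1, -δ.2) ∈ dirsL := by
  simp only [dirsL, List.mem_cons, List.not_mem_nil, or_false] at h ⊢
  rcases h with rfl | rfl | rfl | rfl <;> simp

-- ----- reference distance values lv (the least level, as an Int; -1 = unreached) -----
def lv (g : List (List Char)) (n m : Nat) (src : Int × Int) : Nat → (Int × Int) → Int
  | 0, p => if p = src then 0 else -1
  | k + 1, p =>
      if lv g n m src k p ≠ -1 then lv g n m src k p
      else if visB g n m src (k + 1) p then ((k : Int) + 1) else -1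

theorem lv_neg1_iff (g : List (List Char)) (n m : Nat) (src : Int × Int) :
    ∀ (k : Nat) (p : Int × Int), lv g n m src k p = -1 ↔ visB g n m src k p = false := by
  intro k
  induction k with
  | zero =>
      intro p
      simp only [lv]
      by_cases h : p = src
      · simp [h, visB]
      · simp [h, visB]
  | succ k ih =>
      intro p
      simp only [lv]
      by_cases h1 : lv g n m src k p ≠ -1
      · rw [if_pos h1]
        have hv : visB g n m src k p = true := by
          cases hv : visB g n m src k p
          · exact absurd ((ih p).mpr hv) h1
          · rfl
        have := vis_step_mono g n m src k p hv
        simp [this, h1]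
      · rw [if_neg h1]
        by_cases h2 : visB g n m src (k + 1) p = true
        · simp [h2]; omega
        · simp [h2]

theorem lv_eq_find (g : List (List Char)) (n m : Nat) (src : Int × Int) :
    ∀ (k : Nat) (p : Int × Int) (hv : visB g n m src k p = true)
      (hex : ∃ j, visB g n m src j p = true),
      lv g n m src k p = ((Nat.find hex : Nat) : Int) := by
  intro k
  induction k with
  | zero =>
      intro p hv hex
      rw [vis_zero] at hv
      have : Nat.find hex = 0 := by
        rw [Nat.find_eq_zero]
        rw [vis_zero]
        exact hv
      rw [this]
      simp [lv, hv]
  | succ k ih =>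
      intro p hv hex
      by_cases hk : visB g n m src k p = true
      · have hlv : lv g n m src k p ≠ -1 := by
          rw [Ne, lv_neg1_iff, hk]; simp
        simp only [lv, if_pos hlv]
        exact ih p hk hex
      · have hlv : lv g n m src k p = -1 := by
          rw [lv_neg1_iff]
          cases hc : visB g n m src k p
          · rfl
          · exact absurd hc hk
        simp only [lv, hlv]
        rw [if_neg (by simp), if_pos hv]
        have : Nat.find hex = k + 1 := by
          rw [Nat.find_eq_iff]
          refine ⟨hv, fun j hj hc => ?_⟩
          exact hk (vis_mono g n m src (by omega) hc)
        rw [this]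
        push_cast
        ring

-- a distanced neighbour of a still-undistanced cell carries exactly the current level k
theorem cand_val (g : List (List Char)) (n m : Nat) {src : Int × Int} (k : Nat)
    {p : Int × Int} (hnp : visB g n m src k p = false) (hpin : inReg n m p)
    (hopen : get2d g p.1 p.2 ' ' ≠ 'X') {δ : Int × Int} (hδ : δ ∈ dirsL)
    (hq : visB g n m src k (p.1 + δ.1, p.2 + δ.2) = true) :
    lv g n m src k (p.1 + δ.1, p.2 + δ.2) = (k : Int) := by
  have hex : ∃ j, visB g n m src j (p.1 + δ.1, p.2 + δ.2) = true := ⟨k, hq⟩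
  rw [lv_eq_find g n m src k _ hq hex]
  have hle : Nat.find hex ≤ k := Nat.find_le hq
  have hge : ¬ Nat.find hex < k := by
    intro hlt
    have hspec := Nat.find_spec hex
    have : visB g n m src (Nat.find hex + 1) p = true := by
      rw [vis_succ_iff]
      exact Or.inr ⟨hpin, hopen, δ, hδ, hspec⟩
    have := vis_mono g n m src (by omega : Nat.find hex + 1 ≤ k) this
    rw [this] at hnp
    cases hnp
  have : Nat.find hex = k := by omega
  rw [this]

-- the minimum-of-neighbours fold, when every candidate carries value k
theorem fold_best (dist : List (List Int)) (n m : Int) (k : Nat) :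
    ∀ (L : List (Int × Int)),
      (∀ q ∈ L, candB dist n m q = true → get2d dist q.1 q.2 (-1) = (k : Int)) →
      ∀ b : Int, (b = -1 ∨ b = (k : Int) + 1) →
        L.foldl (bestStep dist n m) b =
          (if b = (k : Int) + 1 ∨ ∃ q ∈ L, candB dist n m q = true then (k : Int) + 1 else -1) := by
  intro L
  induction L with
  | nil =>
      intro _ b hb
      rcases hb with rfl | rfl
      · simp
      · simp
  | cons q T ih =>
      intro hval b hb
      simp only [List.foldl_cons]
      by_cases hc : candB dist n m q = true
      · have hstep : bestStep dist n m b q = (k : Int) + 1 := by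
          unfold bestStep
          rw [if_pos hc, hval q (List.mem_cons_self ..) hc]
          rcases hb with rfl | rfl
          · simp
          · simp
        rw [hstep, ih (fun r hr => hval r (List.mem_cons_of_mem _ hr)) _ (Or.inr rfl)]
        rw [if_pos (Or.inl rfl), if_pos (Or.inr ⟨q, List.mem_cons_self .., hc⟩)]
      · have hstep : bestStep dist n m b q = b := by
          unfold bestStep
          rw [if_neg hc]
        rw [hstep, ih (fun r hr => hval r (List.mem_cons_of_mem _ hr)) _ hb]
        congr 1
        simp only [List.mem_cons, eq_iff_iff]
        constructor
        · rintro (h | ⟨r, hr, hcr⟩)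
          · exact Or.inl h
          · exact Or.inr ⟨r, Or.inr hr, hcr⟩
        · rintro (h | ⟨r, rfl | hr, hcr⟩)
          · exact Or.inl h
          · exact absurd hcr hc
          · exact Or.inr ⟨r, hr, hcr⟩

-- jacobi commutes: applying one more round outside
theorem jacobi_succ (g : List (List Char)) (n m : Nat) :
    ∀ (k : Nat) (d : List (List Int)),
      jacobi g n m (k + 1) d = relaxGrid g (jacobi g n m k d) n m := by
  intro k
  induction k with
  | zero => intro d; rfl
  | succ k ih =>
      intro d
      show jacobi g n m (k + 1) (relaxGrid g d n m) = _
      rw [ih (relaxGrid g d n m)]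
      rfl

-- one relaxation round advances the reference values by one level
theorem relax_step (g : List (List Char)) (n m : Nat) {src : Int × Int}
    (hs : inReg n m src) (k : Nat) (dist : List (List Int))
    (hinv : ∀ p, inReg n m p → get2d dist p.1 p.2 (-1) = lv g n m src k p) :
    ∀ p, inReg n m p →
      get2d (relaxGrid g dist n m) p.1 p.2 (-1) = lv g n m src (k + 1) p := by
  intro p hpin
  obtain ⟨x, y⟩ := p
  have hx0 : 0 ≤ x := hpin.1
  have hy0 : 0 ≤ y := hpin.2.2.1
  unfold relaxGrid
  rw [get2d_mapRange _ _ hpin]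
  rw [Int.toNat_of_nonneg hpin.1, Int.toNat_of_nonneg hpin.2.2.1]
  unfold relaxCell
  rw [hinv (x, y) hpin]
  by_cases h1 : lv g n m src k (x, y) = -1
  case neg =>
    -- already distanced: both sides keep the old value
    rw [if_neg (by simp [h1])]
    simp only [lv, if_pos h1]
  case pos =>
    have hnp : visB g n m src k (x, y) = false := (lv_neg1_iff g n m src k (x, y)).mp h1
    by_cases h2 : get2d g x y ' ' = 'X'
    case pos =>
      rw [if_neg (by simp [h1, h2])]
      have : visB g n m src (k + 1) (x, y) = false := by
        cases hc : visB g n m src (k + 1) (x, y)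
        · rfl
        · rw [vis_succ_iff] at hc
          rcases hc with hc | hc
          · rw [hc] at hnp; cases hnp
          · exact absurd hc.2.1 (by simp [h2])
      simp only [lv, if_neg (by simp [h1] : ¬ lv g n m src k (x, y) ≠ -1), this]
      simp [h1]
    case neg =>
      rw [if_pos (by simp [h1, h2]), h1]
      have hval : ∀ q ∈ [(x, y + 1), (x + 1, y), (x, y - 1), (x - 1, y)],
          candB dist n m q = true → get2d dist q.1 q.2 (-1) = (k : Int) := by
        intro q hq hcq
        have hqin : inReg n m q := by
          unfold candB at hcq
          simp only [Bool.and_eq_true, decide_eq_true_eq] at hcq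
          exact ⟨hcq.1.1.1.1, hcq.1.1.1.2, hcq.1.1.2, hcq.1.2⟩
        have hqd : get2d dist q.1 q.2 (-1) ≠ -1 := by
          unfold candB at hcq
          simp only [Bool.and_eq_true, Bool.not_eq_true', beq_eq_false_iff_ne] at hcq
          exact hcq.2
        rw [hinv q hqin] at hqd ⊢
        have hqv : visB g n m src k q = true := by
          cases hc : visB g n m src k q
          · exact absurd ((lv_neg1_iff g n m src k q).mpr hc) hqd
          · rfl
        -- identify the offset
        have : ∃ δ ∈ dirsL, q = (x + δ.1, y + δ.2) := by
          simp only [List.mem_cons, List.not_mem_nil, or_false] at hq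
          rcases hq with rfl | rfl | rfl | rfl
          · exact ⟨(0, 1), by simp [dirsL], by simp⟩
          · exact ⟨(1, 0), by simp [dirsL], by simp⟩
          · exact ⟨(0, -1), by simp [dirsL], by simp [sub_eq_add_neg]⟩
          · exact ⟨(-1, 0), by simp [dirsL], by simp [sub_eq_add_neg]⟩
        obtain ⟨δ, hδ, rfl⟩ := this
        exact cand_val g n m k hnp hpin h2 hδ hqv
      have hfold := fold_best dist (n : Int) (m : Int) k _ hval (-1) (Or.inl rfl)
      rw [hfold]
      have hiff : ((-1 : Int) = (k : Int) + 1 ∨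
          ∃ q ∈ [(x, y + 1), (x + 1, y), (x, y - 1), (x - 1, y)], candB dist (n : Int) (m : Int) q = true)
          ↔ visB g n m src (k + 1) (x, y) = true := by
        rw [vis_succ_iff, hnp]
        constructor
        · rintro (h | ⟨q, hq, hcq⟩)
          · exact absurd h (by omega)
          · have hqin : inReg n m q := by
              unfold candB at hcq
              simp only [Bool.and_eq_true, decide_eq_true_eq] at hcq
              exact ⟨hcq.1.1.1.1, hcq.1.1.1.2, hcq.1.1.2, hcq.1.2⟩
            have hqd : get2d dist q.1 q.2 (-1) ≠ -1 := by
              unfold candB at hcq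
              simp only [Bool.and_eq_true, Bool.not_eq_true', beq_eq_false_iff_ne] at hcq
              exact hcq.2
            rw [hinv q hqin] at hqd
            have hqv : visB g n m src k q = true := by
              cases hc : visB g n m src k q
              · exact absurd ((lv_neg1_iff g n m src k q).mpr hc) hqd
              · rfl
            have : ∃ δ ∈ dirsL, q = (x + δ.1, y + δ.2) := by
              simp only [List.mem_cons, List.not_mem_nil, or_false] at hq
              rcases hq with rfl | rfl | rfl | rfl
              · exact ⟨(0, 1), by simp [dirsL], by simp⟩
              · exact ⟨(1, 0), by simp [dirsL], by simp⟩
              · exact ⟨(0, -1), by simp [dirsL], by simp [sub_eq_add_neg]⟩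
              · exact ⟨(-1, 0), by simp [dirsL], by simp [sub_eq_add_neg]⟩
            obtain ⟨δ, hδ, rfl⟩ := this
            exact Or.inr ⟨hpin, h2, δ, hδ, hqv⟩
        · rintro (h | ⟨-, -, δ, hδ, hv⟩)
          · cases h
          · refine Or.inr ⟨(x + δ.1, y + δ.2), ?_, ?_⟩
            · simp only [dirsL, List.mem_cons, List.not_mem_nil, or_false] at hδ
              rcases hδ with rfl | rfl | rfl | rfl <;> simp [sub_eq_add_neg]
            · have hqin : inReg n m (x + δ.1, y + δ.2) := vis_inReg g n m hs hv
              have hqd : get2d dist (x + δ.1) (y + δ.2) (-1) ≠ -1 := by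
                rw [hinv _ hqin, Ne, lv_neg1_iff, hv]
                simp
              unfold candB
              simp only [Bool.and_eq_true, decide_eq_true_eq, Bool.not_eq_true',
                beq_eq_false_iff_ne]
              exact ⟨⟨⟨⟨hqin.1, hqin.2.1⟩, hqin.2.2.1⟩, hqin.2.2.2⟩, hqd⟩
      simp only [lv, if_neg (by simp [h1] : ¬ lv g n m src k (x, y) ≠ -1)]
      by_cases hv1 : visB g n m src (k + 1) (x, y) = true
      · rw [if_pos (hiff.mpr hv1), if_pos hv1]
      · rw [if_neg (fun hc => hv1 (hiff.mp hc)), if_neg hv1]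

-- the full relaxation invariant
theorem jacobi_inv (g : List (List Char)) (n m : Nat) {src : Int × Int}
    (hs : inReg n m src) :
    ∀ (k : Nat) (p : Int × Int), inReg n m p →
      get2d (jacobi g n m k (initDist n m src)) p.1 p.2 (-1) = lv g n m src k p := by
  intro k
  induction k with
  | zero =>
      intro p hp
      show get2d (initDist n m src) p.1 p.2 (-1) = _
      obtain ⟨x, y⟩ := p
      unfold initDist
      rw [get2d_mapRange _ _ hp]
      rw [Int.toNat_of_nonneg hp.1, Int.toNat_of_nonneg hp.2.2.1]
      rfl
  | succ k ih =>
      intro p hp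
      rw [jacobi_succ]
      exact relax_step g n m hs k _ (fun q hq => ih q hq) p hp

-- "p enters exactly at level k" pins the final reference value
theorem lv_of_firstV (g : List (List Char)) (n m : Nat) {src : Int × Int}
    (hs : inReg n m src) {k : Nat} {p : Int × Int} (hf : firstV g n m src k p) :
    lv g n m src (n * m) p = (k : Int) := by
  have hex : ∃ j, visB g n m src j p = true := ⟨k, hf.1⟩
  rw [lv_eq_find g n m src (n * m) p (reach_nm g n m hs hf.1) hex,
      find_of_firstV g n m src hf hex]

-- ----- the queue-BFS ⇒ level-set simulation -----

-- a single neighbour step of A's loop, tracked against the level sets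
theorem stepA_enq (g : List (List Char)) (n m : Nat) (src : Int × Int) (k : Nat)
    (f : Int × Int) (hfk : visB g n m src k f = true)
    (i : Int) (δ : Int × Int) (hδ : δ ∈ dirsL)
    (hdx : PySem.List.pyGetD dxA i 0 = δ.1) (hdy : PySem.List.pyGetD dyA i 0 = δ.2)
    (F : List (Int × Int × Int)) (N : List (Int × Int)) (vis : List (List Bool))
    (hd : dims n m vis)
    (hvis : ∀ p, inReg n m p →
      (get2d vis p.1 p.2 false = true ↔ (visB g n m src k p = true ∨ p ∈ N))) :
    ∃ (N' : List (Int × Int)) (vis' : List (List Bool)),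
      stepA g (n : Int) (m : Int) f.1 f.2 (k : Int)
          (F ++ N.map (fun p => (p.1, p.2, (k : Int) + 1)), vis) i
        = (F ++ N'.map (fun p => (p.1, p.2, (k : Int) + 1)), vis') ∧
      dims n m vis' ∧
      (∀ q ∈ N, q ∈ N') ∧
      (∀ q ∈ N', q ∈ N ∨
        (inReg n m q ∧ firstV g n m src (k + 1) q ∧ q = (f.1 + δ.1, f.2 + δ.2))) ∧
      (∀ p, inReg n m p →
        (get2d vis' p.1 p.2 false = true ↔ (visB g n m src k p = true ∨ p ∈ N'))) ∧
      (firstV g n m src (k + 1) (f.1 + δ.1, f.2 + δ.2) → (f.1 + δ.1, f.2 + δ.2) ∈ N') ∧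
      N'.length + countIn vis' false = N.length + countIn vis false := by
  unfold stepA
  simp only [hdx, hdy]
  set r : Int × Int := (f.1 + δ.1, f.2 + δ.2) with hr
  by_cases hir : inReg n m r
  case neg =>
    -- out of range: the guard's range test fails
    refine ⟨N, vis, ?_, hd, fun q hq => hq, fun q hq => Or.inl hq, hvis, ?_, rfl⟩
    · rw [if_neg]
      intro hc
      simp only [Bool.and_eq_true, decide_eq_true_eq] at hc
      exact hir ⟨hc.1.1.1.1.1, hc.1.1.1.1.2, hc.1.1.1.2, hc.1.1.2⟩
    · intro hfv
      have hvk : visB g n m src k r = false := hfv.2 k (by omega)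
      have h1 := hfv.1
      rw [vis_succ_iff, hvk] at h1
      rcases h1 with h | h
      · cases h
      · exact absurd h.1 hir
  case pos =>
    by_cases hx : get2d g r.1 r.2 ' ' = 'X'
    case pos =>
      refine ⟨N, vis, ?_, hd, fun q hq => hq, fun q hq => Or.inl hq, hvis, ?_, rfl⟩
      · rw [if_neg]
        intro hc
        simp only [Bool.and_eq_true, Bool.not_eq_true', beq_eq_false_iff_ne] at hc
        exact hc.1.2 hx
      · intro hfv
        have hvk : visB g n m src k r = false := hfv.2 k (by omega)
        have := hfv.1
        rw [vis_succ_iff, hvk] at this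
        rcases this with h | h
        · cases h
        · exact absurd hx h.2.1
    case neg =>
      by_cases hv : get2d vis r.1 r.2 false = true
      case pos =>
        -- already visited (or queued): nothing happens
        refine ⟨N, vis, ?_, hd, fun q hq => hq, fun q hq => Or.inl hq, hvis, ?_, rfl⟩
        · rw [if_neg]
          intro hc
          simp only [Bool.and_eq_true, Bool.not_eq_true'] at hc
          rw [hv] at hc
          exact absurd hc.2 (by simp)
        · intro hfv
          rcases (hvis r hir).mp hv with h | h
          · rw [hfv.2 k (by omega)] at h; cases h
          · exact h
      case neg =>
        -- fresh cell: enqueued and marked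
        have hguard : ((decide (0 ≤ f.1 + δ.1) && decide (f.1 + δ.1 < (n : Int)) &&
            decide (0 ≤ f.2 + δ.2) && decide (f.2 + δ.2 < (m : Int)))
            && !(get2d g (f.1 + δ.1) (f.2 + δ.2) ' ' == 'X')
            && !(get2d vis (f.1 + δ.1) (f.2 + δ.2) false)) = true := by
          obtain ⟨h1, h2, h3, h4⟩ := hir
          simp only [Bool.and_eq_true, decide_eq_true_eq, Bool.not_eq_true',
            beq_eq_false_iff_ne, Bool.not_eq_true]
          refine ⟨⟨⟨⟨⟨h1, h2⟩, h3⟩, h4⟩, hx⟩, ?_⟩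
          cases hc : get2d vis (f.1 + δ.1) (f.2 + δ.2) false
          · rfl
          · exact absurd hc hv
        have hnvk : visB g n m src k r = false ∧ r ∉ N := by
          constructor
          · cases hc : visB g n m src k r
            · rfl
            · exact absurd ((hvis r hir).mpr (Or.inl hc)) hv
          · intro hc
            exact hv ((hvis r hir).mpr (Or.inr hc))
        have hfirst : firstV g n m src (k + 1) r := by
          constructor
          · rw [vis_succ_iff]
            refine Or.inr ⟨hir, hx, (-δ.1, -δ.2), dirsL_neg hδ, ?_⟩
            have : (r.1 + -δ.1, r.2 + -δ.2) = f := by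
              rw [hr, Prod.ext_iff]; constructor <;> dsimp only <;> ring
            rw [this]
            exact hfk
          · intro j hj
            cases hc : visB g n m src j r
            · rfl
            · have hck := vis_mono g n m src (by omega : j ≤ k) hc
              rw [hck] at hnvk
              exact Bool.noConfusion hnvk.1
        refine ⟨N ++ [r], set2d vis r.1 r.2 true, ?_, dims_set2d hd _ _ _, ?_, ?_, ?_, ?_, ?_⟩
        · rw [if_pos hguard]
          simp [hr]
        · intro q hq; exact List.mem_append.mpr (Or.inl hq)
        · intro q hq
          rcases List.mem_append.mp hq with hq | hq
          · exact Or.inl hq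
          · have : q = r := by simpa using hq
            exact Or.inr ⟨this ▸ hir, this ▸ hfirst, this⟩
        · intro p hp
          by_cases hpr : p = r
          · subst hpr
            rw [get2d_set2d_self hd hp true false]
            simp only [true_iff]
            exact Or.inr (List.mem_append.mpr (Or.inr (by simp)))
          · have hne : (r.1, r.2) ≠ (p.1, p.2) := by
              intro hc
              rw [Prod.ext_iff] at hc
              dsimp only at hc
              exact hpr (Prod.ext_iff.mpr ⟨hc.1.symm, hc.2.symm⟩)
            rw [show (p.1, p.2) = p from rfl] at hne
            rw [get2d_set2d_ne hd hir hp (by simpa using hne) true false]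
            rw [hvis p hp]
            constructor
            · rintro (h | h)
              · exact Or.inl h
              · exact Or.inr (List.mem_append.mpr (Or.inl h))
            · rintro (h | h)
              · exact Or.inl h
              · rcases List.mem_append.mp h with h | h
                · exact Or.inr h
                · exact absurd (by simpa using h) hpr
        · intro _
          exact List.mem_append.mpr (Or.inr (by simp))
        · have hread : get2d vis r.1 r.2 false = false := by
            cases hc : get2d vis r.1 r.2 false
            · rfl
            · exact absurd hc hv
          have hir' : inReg n m (r.1, r.2) := hir
          have hcnt := countIn_set2d (a := false) (b := true) (d := false) hd hir' hread
            (by simp)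
          simp only [List.length_append, List.length_cons, List.length_nil]
          omega

-- processing one popped cell (the head of the level-k part of the queue)
theorem bfsA_step (g : List (List Char)) (n m : Nat) (src L : Int × Int) (target : Char)
    (hs : inReg n m src) (hL : inReg n m L) (hLc : get2d g L.1 L.2 ' ' = target)
    (huniq : ∀ p, inReg n m p → get2d g p.1 p.2 ' ' = target → p = L)
    (fuel : Nat)
    (IH : ∀ (k : Nat) (F N : List (Int × Int)) (vis : List (List Bool)),
      dims n m vis →
      (∀ f ∈ F, inReg n m f ∧ firstV g n m src k f) →
      (∀ q ∈ N, inReg n m q ∧ firstV g n m src (k + 1) q) →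
      (∀ p, inReg n m p →
        (get2d vis p.1 p.2 false = true ↔ (visB g n m src k p = true ∨ p ∈ N))) →
      (∀ r, firstV g n m src (k + 1) r →
        r ∈ N ∨ ∃ f ∈ F, ∃ δ ∈ dirsL, r = (f.1 + δ.1, f.2 + δ.2)) →
      (visB g n m src k L = true → L ∈ F) →
      F.length + N.length + countIn vis false ≤ fuel →
      bfsA g (n : Int) (m : Int) target fuel
          (F.map (fun p => (p.1, p.2, (k : Int))) ++ N.map (fun p => (p.1, p.2, (k : Int) + 1)))
          vis
        = lv g n m src (n * m) L) :
    ∀ (k : Nat) (f : Int × Int) (F N : List (Int × Int)) (vis : List (List Bool)),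
      dims n m vis →
      (∀ f' ∈ f :: F, inReg n m f' ∧ firstV g n m src k f') →
      (∀ q ∈ N, inReg n m q ∧ firstV g n m src (k + 1) q) →
      (∀ p, inReg n m p →
        (get2d vis p.1 p.2 false = true ↔ (visB g n m src k p = true ∨ p ∈ N))) →
      (∀ r, firstV g n m src (k + 1) r →
        r ∈ N ∨ ∃ f' ∈ f :: F, ∃ δ ∈ dirsL, r = (f'.1 + δ.1, f'.2 + δ.2)) →
      (visB g n m src k L = true → L ∈ f :: F) →
      (f :: F).length + N.length + countIn vis false ≤ fuel + 1 →
      bfsA g (n : Int) (m : Int) target (fuel + 1)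
          ((f.1, f.2, (k : Int)) ::
            (F.map (fun p => (p.1, p.2, (k : Int))) ++ N.map (fun p => (p.1, p.2, (k : Int) + 1))))
          vis
        = lv g n m src (n * m) L := by
  intro k f F N vis hd hF hN hvis hcov hL6 hmeas
  have hfin : inReg n m f := (hF f (List.mem_cons_self ..)).1
  have hffv : firstV g n m src k f := (hF f (List.mem_cons_self ..)).2
  simp only [bfsA]
  by_cases hchar : get2d g f.1 f.2 ' ' = target
  case pos =>
    rw [if_pos hchar]
    have hfL : f = L := huniq f hfin hchar
    subst hfL
    exact (lv_of_firstV g n m hs hffv).symm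
  case neg =>
    rw [if_neg hchar]
    have e : PySem.List.pyRange 0 4 1 = [0, 1, 2, 3] := by decide
    rw [e]
    simp only [List.foldl_cons, List.foldl_nil]
    obtain ⟨N1, vis1, heq1, hd1, hmono1, hN1', hvis1, hcov1, hcnt1⟩ :=
      stepA_enq g n m src k f hffv.1 0 (0, 1) (by simp [dirsL]) (by decide) (by decide)
        (F.map (fun p => (p.1, p.2, (k : Int)))) N vis hd hvis
    rw [heq1]
    obtain ⟨N2, vis2, heq2, hd2, hmono2, hN2', hvis2, hcov2, hcnt2⟩ :=
      stepA_enq g n m src k f hffv.1 1 (1, 0) (by simp [dirsL]) (by decide) (by decide)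
        (F.map (fun p => (p.1, p.2, (k : Int)))) N1 vis1 hd1 hvis1
    rw [heq2]
    obtain ⟨N3, vis3, heq3, hd3, hmono3, hN3', hvis3, hcov3, hcnt3⟩ :=
      stepA_enq g n m src k f hffv.1 2 (0, -1) (by simp [dirsL]) (by decide) (by decide)
        (F.map (fun p => (p.1, p.2, (k : Int)))) N2 vis2 hd2 hvis2
    rw [heq3]
    obtain ⟨N4, vis4, heq4, hd4, hmono4, hN4', hvis4, hcov4, hcnt4⟩ :=
      stepA_enq g n m src k f hffv.1 3 (-1, 0) (by simp [dirsL]) (by decide) (by decide)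
        (F.map (fun p => (p.1, p.2, (k : Int)))) N3 vis3 hd3 hvis3
    rw [heq4]
    -- rebuild the invariant for the tail call
    have hNfv : ∀ q ∈ N4, inReg n m q ∧ firstV g n m src (k + 1) q := by
      intro q hq
      rcases hN4' q hq with hq3 | h
      · rcases hN3' q hq3 with hq2 | h
        · rcases hN2' q hq2 with hq1 | h
          · rcases hN1' q hq1 with hq0 | h
            · exact hN q hq0
            · exact ⟨h.1, h.2.1⟩
          · exact ⟨h.1, h.2.1⟩
        · exact ⟨h.1, h.2.1⟩
      · exact ⟨h.1, h.2.1⟩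
    have hmono14 : ∀ q ∈ N1, q ∈ N4 := fun q hq =>
      hmono4 q (hmono3 q (hmono2 q hq))
    have hmono24 : ∀ q ∈ N2, q ∈ N4 := fun q hq => hmono4 q (hmono3 q hq)
    have hcovNew : ∀ r, firstV g n m src (k + 1) r →
        r ∈ N4 ∨ ∃ f' ∈ F, ∃ δ ∈ dirsL, r = (f'.1 + δ.1, f'.2 + δ.2) := by
      intro r hr
      rcases hcov r hr with hrN | ⟨f', hf', δ, hδ, hrf⟩
      · exact Or.inl (hmono14 _ (hmono1 _ hrN))
      · rcases List.mem_cons.mp hf' with rfl | hf'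
        · subst hrf
          left
          simp only [dirsL, List.mem_cons, List.not_mem_nil, or_false] at hδ
          rcases hδ with rfl | rfl | rfl | rfl
          · exact hmono14 _ (hcov1 hr)
          · exact hmono24 _ (hcov2 hr)
          · exact hmono4 _ (hcov3 hr)
          · exact hcov4 hr
        · exact Or.inr ⟨f', hf', δ, hδ, hrf⟩
    have hL6' : visB g n m src k L = true → L ∈ F := by
      intro h
      rcases List.mem_cons.mp (hL6 h) with rfl | hm
      · exact absurd hLc hchar
      · exact hm
    have hmeas' : F.length + N4.length + countIn vis4 false ≤ fuel := by
      simp only [List.length_cons] at hmeas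
      omega
    exact IH k F N4 vis4 hd4 (fun f' hf' => hF f' (List.mem_cons_of_mem _ hf'))
      hNfv hvis4 hcovNew hL6' hmeas'

-- when the whole queue is empty, nothing is reachable beyond the current levels
theorem noreach (g : List (List Char)) (n m : Nat) (src L : Int × Int) (k : Nat)
    (hcov : ∀ r, firstV g n m src (k + 1) r → False)
    (hL6 : visB g n m src k L = true → False) :
    lv g n m src (n * m) L = -1 := by
  have hstable : stableAt g n m src k := by
    intro p
    cases hk : visB g n m src k p
    · cases hk1 : visB g n m src (k + 1) p
      · rfl
      · exfalso
        refine hcov p ⟨hk1, fun j hj => ?_⟩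
        cases hj2 : visB g n m src j p
        · rfl
        · have := vis_mono g n m src (by omega : j ≤ k) hj2
          rw [this] at hk
          cases hk
    · exact vis_step_mono g n m src k p hk
  rw [lv_neg1_iff]
  cases hc : visB g n m src (n * m) L
  · rfl
  · exfalso
    apply hL6
    by_cases hkm : k ≤ n * m
    · rw [stable_ge g n m src hstable (n * m) hkm L] at hc
      exact hc
    · exact vis_mono g n m src (by omega) hc

-- the main simulation: A's counted-queue BFS computes the reference distance value
theorem bfsA_sim (g : List (List Char)) (n m : Nat) (src L : Int × Int) (target : Char)
    (hs : inReg n m src) (hL : inReg n m L) (hLc : get2d g L.1 L.2 ' ' = target)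
    (huniq : ∀ p, inReg n m p → get2d g p.1 p.2 ' ' = target → p = L) :
    ∀ (fuel k : Nat) (F N : List (Int × Int)) (vis : List (List Bool)),
      dims n m vis →
      (∀ f ∈ F, inReg n m f ∧ firstV g n m src k f) →
      (∀ q ∈ N, inReg n m q ∧ firstV g n m src (k + 1) q) →
      (∀ p, inReg n m p →
        (get2d vis p.1 p.2 false = true ↔ (visB g n m src k p = true ∨ p ∈ N))) →
      (∀ r, firstV g n m src (k + 1) r →
        r ∈ N ∨ ∃ f ∈ F, ∃ δ ∈ dirsL, r = (f.1 + δ.1, f.2 + δ.2)) →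
      (visB g n m src k L = true → L ∈ F) →
      F.length + N.length + countIn vis false ≤ fuel →
      bfsA g (n : Int) (m : Int) target fuel
          (F.map (fun p => (p.1, p.2, (k : Int))) ++ N.map (fun p => (p.1, p.2, (k : Int) + 1)))
          vis
        = lv g n m src (n * m) L := by
  intro fuel
  induction fuel with
  | zero =>
      intro k F N vis hd hF hN hvis hcov hL6 hmeas
      have hF0 : F = [] := List.length_eq_zero_iff.mp (by omega)
      have hN0 : N = [] := List.length_eq_zero_iff.mp (by omega)
      subst hF0; subst hN0
      simp only [List.map_nil, List.nil_append, bfsA]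
      refine (noreach g n m src L k (fun r hr => ?_) (fun h => by simpa using hL6 h)).symm
      rcases hcov r hr with h | ⟨f, hf, -⟩
      · cases h
      · cases hf
  | succ fuel ih =>
      intro k F N vis hd hF hN hvis hcov hL6 hmeas
      cases F with
      | nil =>
          cases N with
          | nil =>
              simp only [List.map_nil, List.nil_append, bfsA]
              refine (noreach g n m src L k (fun r hr => ?_) (fun h => by simpa using hL6 h)).symm
              rcases hcov r hr with h | ⟨f, hf, -⟩
              · cases h
              · cases hf
          | cons q N' =>
              -- level shift: the queue is entirely the level-(k+1) part
              have hq := hN q (List.mem_cons_self ..)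
              have hvis' : ∀ p, inReg n m p →
                  (get2d vis p.1 p.2 false = true ↔
                    (visB g n m src (k + 1) p = true ∨ p ∈ ([] : List (Int × Int)))) := by
                intro p hp
                rw [hvis p hp]
                constructor
                · rintro (h | h)
                  · exact Or.inl (vis_step_mono g n m src k p h)
                  · exact Or.inl ((hN p h).2.1)
                · rintro (h | h)
                  · rw [vis_succ_iff] at h
                    rcases h with h | h
                    · exact Or.inl h
                    · by_cases hk : visB g n m src k p = true
                      · exact Or.inl hk
                      · right
                        rcases hcov p ⟨by rw [vis_succ_iff]; exact Or.inr h,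
                            fun j hj => by
                              cases hc : visB g n m src j p
                              · rfl
                              · exact absurd (vis_mono g n m src (by omega : j ≤ k) hc) hk⟩
                          with h1 | ⟨f, hf, -⟩
                        · exact h1
                        · cases hf
                  · cases h
              have hcov' : ∀ r, firstV g n m src (k + 2) r →
                  r ∈ ([] : List (Int × Int)) ∨
                    ∃ f ∈ q :: N', ∃ δ ∈ dirsL, r = (f.1 + δ.1, f.2 + δ.2) := by
                intro r hr
                have hrk1 : visB g n m src (k + 1) r = false := hr.2 (k + 1) (by omega)
                have h1 := hr.1
                rw [vis_succ_iff, hrk1] at h1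
                rcases h1 with h1 | ⟨hrin, hropen, δ, hδ, hvq⟩
                · cases h1
                · have hqk : visB g n m src k (r.1 + δ.1, r.2 + δ.2) = false := by
                    cases hc : visB g n m src k (r.1 + δ.1, r.2 + δ.2)
                    · rfl
                    · exfalso
                      have : visB g n m src (k + 1) r = true := by
                        rw [vis_succ_iff]
                        exact Or.inr ⟨hrin, hropen, δ, hδ, hc⟩
                      rw [this] at hrk1
                      cases hrk1
                  have hfv : firstV g n m src (k + 1) (r.1 + δ.1, r.2 + δ.2) := by
                    refine ⟨hvq, fun j hj => ?_⟩
                    cases hc : visB g n m src j (r.1 + δ.1, r.2 + δ.2)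
                    · rfl
                    · have := vis_mono g n m src (by omega : j ≤ k) hc
                      rw [this] at hqk
                      cases hqk
                  rcases hcov _ hfv with hmem | ⟨f, hf, -⟩
                  · right
                    refine ⟨(r.1 + δ.1, r.2 + δ.2), hmem, (-δ.1, -δ.2), dirsL_neg hδ, ?_⟩
                    rw [Prod.ext_iff]
                    constructor <;> dsimp only <;> ring
                  · cases hf
              have hL6' : visB g n m src (k + 1) L = true → L ∈ q :: N' := by
                intro h
                rw [vis_succ_iff] at h
                rcases h with h | h
                · exact absurd (hL6 h) (by simp)
                · by_cases hk : visB g n m src k L = true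
                  · exact absurd (hL6 hk) (by simp)
                  · rcases hcov L ⟨by rw [vis_succ_iff]; exact Or.inr h,
                        fun j hj => by
                          cases hc : visB g n m src j L
                          · rfl
                          · exact absurd (vis_mono g n m src (by omega : j ≤ k) hc) hk⟩
                      with h1 | ⟨f, hf, -⟩
                    · exact h1
                    · cases hf
              have hqeq : (([] : List (Int × Int)).map (fun p => (p.1, p.2, (k : Int))) ++
                    (q :: N').map (fun p => (p.1, p.2, (k : Int) + 1)))
                  = ((q.1, q.2, ((k + 1 : Nat) : Int)) ::
                    (N'.map (fun p => (p.1, p.2, ((k + 1 : Nat) : Int))) ++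
                      ([] : List (Int × Int)).map (fun p => (p.1, p.2, ((k + 1 : Nat) : Int) + 1)))) := by
                push_cast
                simp
              rw [hqeq]
              refine bfsA_step g n m src L target hs hL hLc huniq fuel ih (k + 1) q N' []
                vis hd ?_ (by intro q' hq'; cases hq') hvis'
                (by intro r hr
                    rcases hcov' r hr with h | h
                    · cases h
                    · exact Or.inr h) hL6' ?_
              · intro f' hf'
                exact hN f' hf'
              · simp only [List.length_cons, List.length_nil] at hmeas ⊢
                omega
      | cons f F' =>
          have hqeq : ((f :: F').map (fun p => (p.1, p.2, (k : Int))) ++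
                N.map (fun p => (p.1, p.2, (k : Int) + 1)))
              = ((f.1, f.2, (k : Int)) ::
                (F'.map (fun p => (p.1, p.2, (k : Int))) ++
                  N.map (fun p => (p.1, p.2, (k : Int) + 1)))) := by
            simp
          rw [hqeq]
          exact bfsA_step g n m src L target hs hL hLc huniq fuel ih k f F' N vis hd
            hF hN hvis hcov hL6 hmeas

-- A's BFS returns -1 when no cell of the grid carries the target character
theorem bfsA_none (g : List (List Char)) {n m : Nat} (target : Char)
    (hno : ∀ p, inReg n m p → get2d g p.1 p.2 ' ' ≠ target) :
    ∀ (fuel : Nat) (q : List (Int × Int × Int)) (vis : List (List Bool)),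
      dims n m vis → (∀ t ∈ q, inReg n m (t.1, t.2.1)) →
      q.length + countIn vis false ≤ fuel →
      bfsA g (n : Int) (m : Int) target fuel q vis = -1 := by
  intro fuel
  induction fuel with
  | zero => intro q vis _ _ _; simp [bfsA]
  | succ fuel ih =>
      intro q vis hd hmem hlen
      cases q with
      | nil => simp [bfsA]
      | cons t rest =>
          obtain ⟨x, y, c⟩ := t
          have hin : inReg n m (x, y) := hmem _ (List.mem_cons_self ..)
          simp only [bfsA]
          rw [if_neg (hno _ hin)]
          have hfold := foldl_inv
            (fun (st : List (Int × Int × Int) × List (List Bool)) =>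
              dims n m st.2 ∧ (∀ t ∈ st.1, inReg n m (t.1, t.2.1)) ∧
                st.1.length + countIn st.2 false = rest.length + countIn vis false)
            (stepA g (n : Int) (m : Int) x y c) (PySem.List.pyRange 0 4 1) (rest, vis)
            ⟨hd, fun t ht => hmem t (List.mem_cons_of_mem _ ht), rfl⟩
            ?_
          · exact ih _ _ hfold.1 hfold.2.1 (by simp at hlen; omega)
          · intro st i _ h
            obtain ⟨hd1, hm1, hc1⟩ := h
            simp only [stepA]
            split
            · next hcond =>
                simp only [Bool.and_eq_true, decide_eq_true_eq, Bool.not_eq_true'] at hcond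
                have hirg : inReg n m
                    (x + PySem.List.pyGetD dxA i 0, y + PySem.List.pyGetD dyA i 0) :=
                  ⟨hcond.1.1.1.1.1, hcond.1.1.1.1.2, hcond.1.1.1.2, hcond.1.1.2⟩
                refine ⟨dims_set2d hd1 _ _ _, ?_, ?_⟩
                · intro t ht
                  rcases List.mem_append.mp ht with h1 | h1
                  · exact hm1 t h1
                  · have : t = (x + PySem.List.pyGetD dxA i 0,
                        y + PySem.List.pyGetD dyA i 0, c + 1) := by simpa using h1
                    subst this
                    exact hirg
                · have := countIn_set2d (a := false) (b := true) (d := false) hd1 hirg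
                    hcond.2 (by simp)
                  simp only [List.length_append, List.length_cons, List.length_nil]
                  omega
            · exact ⟨hd1, hm1, hc1⟩

-- scan characterisation
theorem mem_idxPairs {n m : Nat} {p : Int × Int} : p ∈ idxPairs n m ↔ inReg n m p := by
  constructor
  · intro hmem
    obtain ⟨i, hi, hp⟩ := List.mem_flatMap.mp hmem
    obtain ⟨j, hj, hpj⟩ := List.mem_map.mp hp
    rw [List.mem_range] at hi hj
    rw [← hpj]
    refine ⟨?_, ?_, ?_, ?_⟩ <;> simp <;> omega
  · rintro ⟨h1, h2, h3, h4⟩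
    refine List.mem_flatMap.mpr ⟨p.1.toNat, List.mem_range.mpr (by omega),
      List.mem_map.mpr ⟨p.2.toNat, List.mem_range.mpr (by omega), ?_⟩⟩
    rw [Prod.ext_iff]
    constructor <;> simp <;> omega

theorem scan2_aux (g : List (List Char)) (c1 c2 : Char) (hne : c1 ≠ c2) :
    ∀ (l : List (Int × Int)) (a b : Option (Int × Int)),
    l.foldl (fun acc p => if get2d g p.1 p.2 ' ' = c1 then (some p, acc.2)
      else if get2d g p.1 p.2 ' ' = c2 then (acc.1, some p) else acc) (a, b)
    = (l.foldl (fun acc p => if get2d g p.1 p.2 ' ' = c1 then some p else acc) a,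
       l.foldl (fun acc p => if get2d g p.1 p.2 ' ' = c2 then some p else acc) b) := by
  intro l
  induction l with
  | nil => intro a b; rfl
  | cons p t ih =>
      intro a b
      simp only [List.foldl_cons]
      by_cases h1 : get2d g p.1 p.2 ' ' = c1
      · rw [if_pos h1, if_pos h1, if_neg (by rw [h1]; exact hne), ih]
      · rw [if_neg h1, if_neg h1]
        by_cases h2 : get2d g p.1 p.2 ' ' = c2
        · rw [if_pos h2, if_pos h2, ih]
        · rw [if_neg h2, if_neg h2, ih]

theorem scanA_eq (g : List (List Char)) (n m : Nat) :
    scanA g n m = (lastOcc g 'S' n m, lastOcc g 'L' n m) := by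
  unfold scanA lastOcc
  exact scan2_aux g 'S' 'L' (by decide) (idxPairs n m) none none

-- B's dict of marker positions holds exactly the last occurrence of each character
theorem foldl_insert_get? (key : Int × Int → Char) (c : Char) :
    ∀ (l : List (Int × Int)) (d : PySem.Dict Char (Int × Int)),
    PySem.Dict.get? (l.foldl (fun d p => PySem.Dict.insert d (key p) p) d) c
      = l.foldl (fun a p => if key p = c then some p else a) (PySem.Dict.get? d c) := by
  intro l
  induction l with
  | nil => intro d; rfl
  | cons p t ih =>
      intro d
      simp only [List.foldl_cons]
      rw [ih]
      congr 1
      rw [PySem.Dict.get?_insert]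
      by_cases h : key p = c
      · rw [if_pos h, if_pos h.symm]
      · rw [if_neg h, if_neg (fun hc => h hc.symm)]

theorem dict_get_eq_lastOcc (g : List (List Char)) (n m : Nat) (c : Char) :
    PySem.Dict.get? ((idxPairs n m).foldl
        (fun d p => PySem.Dict.insert d (get2d g p.1 p.2 ' ') p)
        (PySem.Dict.empty : PySem.Dict Char (Int × Int))) c = lastOcc g c n m := by
  rw [foldl_insert_get? (fun p => get2d g p.1 p.2 ' ') c (idxPairs n m) PySem.Dict.empty]
  rw [PySem.Dict.get?_empty]
  rfl

theorem lastOcc_some {g : List (List Char)} {c : Char} {n m : Nat} {p : Int × Int}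
    (h : lastOcc g c n m = some p) : inReg n m p ∧ get2d g p.1 p.2 ' ' = c := by
  have := foldl_inv
    (fun (o : Option (Int × Int)) => ∀ q, o = some q → inReg n m q ∧ get2d g q.1 q.2 ' ' = c)
    (fun a p => if get2d g p.1 p.2 ' ' = c then some p else a) (idxPairs n m) none
    (fun q hq => by cases hq)
    (fun a p hp ha => by
      dsimp only
      split
      · next hc => intro q hq; cases hq; exact ⟨mem_idxPairs.mp hp, hc⟩
      · exact ha)
  exact this p h

theorem lastOcc_none {g : List (List Char)} {c : Char} {n m : Nat}
    (h : lastOcc g c n m = none) : ∀ p, inReg n m p → get2d g p.1 p.2 ' ' ≠ c := by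
  intro p hp hc
  have hsome : ∀ (l : List (Int × Int)) (a : Option (Int × Int)),
      (∃ q ∈ l, get2d g q.1 q.2 ' ' = c) →
      (l.foldl (fun a p => if get2d g p.1 p.2 ' ' = c then some p else a) a).isSome := by
    intro l
    induction l with
    | nil => rintro a ⟨q, hq, -⟩; cases hq
    | cons r t ih =>
        rintro a ⟨q, hq, hqc⟩
        simp only [List.foldl_cons]
        rcases List.mem_cons.mp hq with rfl | hmem
        · rw [if_pos hqc]
          exact foldl_inv (fun (o : Option (Int × Int)) => o.isSome) _ t (some q) rfl
            (fun o p _ ho => by split <;> simp [ho])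
        · exact ih _ ⟨q, hmem, hqc⟩
  have := hsome (idxPairs n m) none ⟨p, mem_idxPairs.mpr hp, hc⟩
  rw [lastOcc] at h
  rw [h] at this
  cases this

theorem eq_of_length_le_one {α : Type} {l : List α} (h : l.length ≤ 1) {a b : α}
    (ha : a ∈ l) (hb : b ∈ l) : a = b := by
  match l, h with
  | [], _ => cases ha
  | [x], _ => rw [List.mem_singleton.mp ha, List.mem_singleton.mp hb]

theorem rowCount (c : Char) : ∀ (r : List Char),
    (List.range r.length).countP (fun j => decide (r.getD j ' ' = c)) = r.count c := by
  intro r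
  induction r with
  | nil => simp
  | cons hd tl ih =>
      rw [List.length_cons, List.range_succ_eq_map, List.countP_cons, List.countP_map]
      simp only [List.getD_cons_zero, List.getD_cons_succ, Function.comp_def]
      rw [List.count_cons, ih]
      by_cases h : hd = c
      · simp [h]
      · simp [h]

-- counting bridge between Pre_'s flatten.count and cells of the region
theorem get2d_cons_succ {α : Type} (hd : List α) (tl : List (List α)) {a : Int}
    (ha : 0 ≤ a) (b : Int) (d : α) : get2d (hd :: tl) (a + 1) b d = get2d tl a b d := by
  unfold get2d
  congr 1
  rw [show a + 1 = ((a.toNat + 1 : Nat) : Int) by omega, show a = ((a.toNat : Nat) : Int) by omega]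
  rw [PySem.List.pyGetD_natCast, PySem.List.pyGetD_natCast]
  exact List.getD_cons_succ ..

theorem rowCountGe (c : Char) (r : List Char) (m : Nat) (h : m ≤ r.length) :
    (List.range m).countP (fun j => decide (r.getD j ' ' = c)) = (r.take m).count c := by
  have h1 : (r.take m).length = m := by simp [h]
  have := rowCount c (r.take m)
  rw [h1] at this
  rw [← this]
  apply List.countP_congr
  intro j hj
  rw [List.mem_range] at hj
  congr 1
  rw [List.getD_eq_getElem _ ' ' (by omega), List.getD_eq_getElem _ ' ' (by omega),
    List.getElem_take]

theorem gridCount_aux (m : Nat) (c : Char) : ∀ (g : List (List Char)),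
    (∀ r ∈ g, m ≤ r.length) →
    ((g.map (fun r => r.take m)).flatten).count c = (idxPairs g.length m).countP
      (fun p => decide (get2d g p.1 p.2 ' ' = c)) := by
  intro g
  induction g with
  | nil => simp [idxPairs]
  | cons hd tl ih =>
      intro hrow
      have hhd : m ≤ hd.length := hrow hd (List.mem_cons_self ..)
      have htl : ∀ r ∈ tl, m ≤ r.length := fun r hr => hrow r (List.mem_cons_of_mem _ hr)
      have hsplit : idxPairs (hd :: tl).length m =
          ((List.range m).map fun (j : Nat) => ((0 : Int), (j : Int))) ++
            ((idxPairs tl.length m).map fun p => (p.1 + 1, p.2)) := by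
        simp only [idxPairs, List.length_cons, List.range_succ_eq_map, List.flatMap_cons,
          List.flatMap_map, List.map_flatMap, List.map_map, Function.comp_def]
        congr 1
      rw [List.map_cons, List.flatten_cons, List.count_append, hsplit, List.countP_append]
      congr 1
      · rw [List.countP_map, ← rowCountGe c hd m hhd]
        apply List.countP_congr
        intro j hj
        simp only [Function.comp_def]
        unfold get2d
        rw [PySem.List.pyGetD_zero_cons, PySem.List.pyGetD_natCast]
      · rw [List.countP_map, ih htl]
        apply List.countP_congr
        intro p hp
        have hp0 : 0 ≤ p.1 := (mem_idxPairs.mp hp).1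
        simp only [Function.comp_def]
        rw [get2d_cons_succ hd tl hp0]

theorem gridCount {n m : Nat} {g : List (List Char)} (h : dimsGe n m g) (c : Char) :
    ((g.map (fun r => r.take m)).flatten).count c =
      (idxPairs n m).countP (fun p => get2d g p.1 p.2 ' ' = c) := by
  obtain ⟨hlen, hrow⟩ := h
  subst hlen
  exact gridCount_aux m c g hrow

theorem count_unique {n m : Nat} {g : List (List Char)} (h : dimsGe n m g) {c : Char}
    (hc : ((g.map (fun r => r.take m)).flatten).count c ≤ 1) :
    ∀ p q, inReg n m p → inReg n m q → get2d g p.1 p.2 ' ' = c →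
      get2d g q.1 q.2 ' ' = c → p = q := by
  intro p q hp hq hpc hqc
  rw [gridCount h c, List.countP_eq_length_filter] at hc
  have hpf : p ∈ (idxPairs n m).filter (fun p => decide (get2d g p.1 p.2 ' ' = c)) :=
    List.mem_filter.mpr ⟨mem_idxPairs.mpr hp, by simpa using hpc⟩
  have hqf : q ∈ (idxPairs n m).filter (fun p => decide (get2d g p.1 p.2 ' ' = c)) :=
    List.mem_filter.mpr ⟨mem_idxPairs.mpr hq, by simpa using hqc⟩
  exact eq_of_length_le_one hc hpf hqf

theorem count_exists {n m : Nat} {g : List (List Char)} (h : dimsGe n m g) {c : Char}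
    (hc : 1 ≤ ((g.map (fun r => r.take m)).flatten).count c) :
    ∃ p, inReg n m p ∧ get2d g p.1 p.2 ' ' = c := by
  rw [gridCount h c, List.countP_eq_length_filter] at hc
  rcases hfe : (idxPairs n m).filter (fun p => decide (get2d g p.1 p.2 ' ' = c)) with _ | ⟨p, t⟩
  · rw [hfe] at hc; simp at hc
  · have hpf : p ∈ (idxPairs n m).filter (fun p => decide (get2d g p.1 p.2 ' ' = c)) := by
      rw [hfe]; exact List.mem_cons_self ..
    obtain ⟨hmem, hpred⟩ := List.mem_filter.mp hpf
    exact ⟨p, mem_idxPairs.mp hmem, by simpa using hpred⟩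

theorem count_pos {n m : Nat} {g : List (List Char)} (h : dimsGe n m g) {c : Char}
    {p : Int × Int} (hp : inReg n m p) (hpc : get2d g p.1 p.2 ' ' = c) :
    1 ≤ ((g.map (fun r => r.take m)).flatten).count c := by
  rw [gridCount h c]
  exact List.countP_pos_iff.mpr ⟨p, mem_idxPairs.mpr hp, by simpa using hpc⟩

-- a full BFS run from src equals the reference distance value at the unique target cell
theorem bfs_run (g : List (List Char)) (n m : Nat) (src L : Int × Int) (target : Char)
    (hs : inReg n m src) (hL : inReg n m L) (hLc : get2d g L.1 L.2 ' ' = target)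
    (huniq : ∀ p, inReg n m p → get2d g p.1 p.2 ' ' = target → p = L) :
    bfsA g (n : Int) (m : Int) target (n * m + 1) [(src.1, src.2, 0)]
        (set2d (List.replicate n (List.replicate m false)) src.1 src.2 true)
      = lv g n m src (n * m) L := by
  have hrepd : dims n m (List.replicate n (List.replicate m false)) := dims_replicate n m false
  have hd0 : dims n m (set2d (List.replicate n (List.replicate m false)) src.1 src.2 true) :=
    dims_set2d hrepd _ _ _
  have hcnt := countIn_set2d (a := false) (b := true) (d := false) hrepd
    (by exact hs) (get2d_replicate (by exact hs) false false) (by simp)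
  rw [countIn_replicate] at hcnt
  have hq : ([(src.1, src.2, (0 : Int))] : List (Int × Int × Int))
      = ([src].map (fun p => (p.1, p.2, ((0 : Nat) : Int))) ++
          ([] : List (Int × Int)).map (fun p => (p.1, p.2, ((0 : Nat) : Int) + 1))) := by
    simp
  rw [hq]
  refine bfsA_sim g n m src L target hs hL hLc huniq (n * m + 1) 0 [src] []
    (set2d (List.replicate n (List.replicate m false)) src.1 src.2 true)
    hd0 ?_ ?_ ?_ ?_ ?_ ?_
  case refine_2 => intro q hq; cases hq
  · intro f hf
    have : f = src := by simpa using hf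
    subst this
    exact ⟨hs, by rw [vis_zero], fun j hj => by omega⟩
  · intro p hp
    constructor
    · intro hv
      left
      rw [vis_zero]
      by_contra hps
      have hne : (src.1, src.2) ≠ (p.1, p.2) := by
        intro hc
        rw [Prod.ext_iff] at hc
        dsimp only at hc
        exact hps (Prod.ext_iff.mpr ⟨hc.1.symm, hc.2.symm⟩)
      rw [show (p.1, p.2) = p from rfl] at hne
      rw [get2d_set2d_ne hrepd hs hp (by simpa using hne) true false,
        get2d_replicate hp] at hv
      cases hv
    · rintro (hv | hv)
      · rw [vis_zero] at hv
        subst hv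
        exact get2d_set2d_self hrepd hs true false
      · cases hv
  · intro r hr
    have hr0 : visB g n m src 0 r = false := hr.2 0 (by omega)
    have h1 := hr.1
    rw [vis_succ_iff, hr0] at h1
    rcases h1 with h1 | ⟨hrin, hropen, δ, hδ, hvq⟩
    · cases h1
    · right
      rw [vis_zero] at hvq
      refine ⟨src, by simp, (-δ.1, -δ.2), dirsL_neg hδ, ?_⟩
      have h2 : r.1 + δ.1 = src.1 ∧ r.2 + δ.2 = src.2 := by
        rw [Prod.ext_iff] at hvq
        exact ⟨hvq.1, hvq.2⟩
      rw [Prod.ext_iff]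
      constructor <;> dsimp only <;> omega
  · intro h
    rw [vis_zero] at h
    simp [h]
  · simp only [List.length_cons, List.length_nil]
    omega

-- ===== VERDICT =====
theorem solution_spec : Claim_equal_solution := by
  intro maps _ hpre
  obtain ⟨hne, hrect, hS, hLE⟩ := hpre
  unfold Spec_solution
  cases maps with
  | nil => exact absurd rfl hne
  | cons s0 rest =>
    simp only [solution, solution_alt]
    set g : List (List Char) := (s0 :: rest).map String.toList with hgdef
    have hgcons : g = s0.toList :: rest.map String.toList := by simp [hgdef]
    have hhead : g.headD [] = s0.toList := by rw [hgcons]; rfl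
    set N : Nat := g.length with hNdef
    set M : Nat := (g.headD []).length with hMdef
    have hdims : dimsGe N M g := by
      refine ⟨rfl, fun r hr => ?_⟩
      obtain ⟨s, hs, rfl⟩ := List.mem_map.mp hr
      rw [hMdef, hhead]
      simpa using hrect s hs
    have hcnt_eq : ∀ c, cntRegion (s0 :: rest) c =
        ((g.map (fun r => r.take M)).flatten).count c := by
      intro c
      unfold cntRegion
      rw [hgdef, List.map_map]
      have hM' : ((s0 :: rest).headD "").toList.length = M := by
        rw [hMdef, hhead]
        rfl
      rw [hM']
      simp [Function.comp_def]
    rw [hcnt_eq] at hS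
    rw [hcnt_eq, hcnt_eq] at hLE
    -- the start cell
    obtain ⟨sp, hsp_in, hsp_c⟩ := count_exists hdims hS
    have hSsome : lastOcc g 'S' N M ≠ none := fun h => lastOcc_none h sp hsp_in hsp_c
    obtain ⟨s, hs⟩ := Option.ne_none_iff_exists'.mp hSsome
    obtain ⟨hs_in, hs_c⟩ := lastOcc_some hs
    rw [scanA_eq, dict_get_eq_lastOcc, dict_get_eq_lastOcc, dict_get_eq_lastOcc, hs]
    have hrepdb : dims N M (List.replicate N (List.replicate M false)) :=
      dims_replicate N M false
    cases hLo : lastOcc g 'L' N M with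
    | none =>
        -- no lever: A's first BFS can never pop an 'L'; B returns -1 outright
        dsimp only
        have hnoL := lastOcc_none hLo
        have hcf := countIn_set2d (a := false) (b := true) (d := false) hrepdb hs_in
          (get2d_replicate hs_in false false) (by simp)
        rw [countIn_replicate] at hcf
        have hA := bfsA_none g 'L' hnoL (N * M + 1) [(s.1, s.2, 0)]
          (set2d (List.replicate N (List.replicate M false)) s.1 s.2 true)
          (dims_set2d hrepdb _ _ _)
          (fun t ht => by
            have : t = (s.1, s.2, 0) := by simpa using ht
            subst this; exact hs_in)
          (by simp; omega)
        rw [hA]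
        simp
    | some l =>
        obtain ⟨hl_in, hl_c⟩ := lastOcc_some hLo
        cases hEo : lastOcc g 'E' N M with
        | none =>
            -- no exit: B returns -1; whatever A's first BFS yields, its second BFS
            -- (if reached at all) can never pop an 'E', so A returns -1 too
            dsimp only
            have hnoE := lastOcc_none hEo
            have hcf := countIn_set2d (a := false) (b := true) (d := false) hrepdb hl_in
              (get2d_replicate hl_in false false) (by simp)
            rw [countIn_replicate] at hcf
            have hA := bfsA_none g 'E' hnoE (N * M + 1) [(l.1, l.2, 0)]
              (set2d (List.replicate N (List.replicate M false)) l.1 l.2 true)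
              (dims_set2d hrepdb _ _ _)
              (fun t ht => by
                have : t = (l.1, l.2, 0) := by simpa using ht
                subst this; exact hl_in)
              (by simp; omega)
            by_cases h1 : bfsA g (↑N) (↑M) 'L' (N * M + 1) [(s.1, s.2, 0)]
                (set2d (List.replicate N (List.replicate M false)) s.1 s.2 true) = -1
            · rw [if_pos h1]
            · rw [if_neg h1, hA]
              simp
        | some e =>
            dsimp only
            obtain ⟨he_in, he_c⟩ := lastOcc_some hEo
            -- both markers occur, so Pre_'s disjunction collapses to uniqueness of each
            have hL1 : ((g.map (fun r => r.take M)).flatten).count 'L' ≤ 1 := by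
              have h1 := count_pos hdims hl_in hl_c
              have h2 := count_pos hdims he_in he_c
              rcases hLE with ⟨ha, _⟩ | ha | ha
              · exact ha
              · omega
              · omega
            have hE1 : ((g.map (fun r => r.take M)).flatten).count 'E' ≤ 1 := by
              have h1 := count_pos hdims hl_in hl_c
              have h2 := count_pos hdims he_in he_c
              rcases hLE with ⟨_, ha⟩ | ha | ha
              · exact ha
              · omega
              · omega
            have huniqL : ∀ p, inReg N M p → get2d g p.1 p.2 ' ' = 'L' → p = l :=
              fun p hp hc => count_unique hdims hL1 p l hp hl_in hc hl_c
            have huniqE : ∀ p, inReg N M p → get2d g p.1 p.2 ' ' = 'E' → p = e :=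
              fun p hp hc => count_unique hdims hE1 p e hp he_in hc he_c
            rw [bfs_run g N M s l 'L' hs_in hl_in hl_c huniqL,
                bfs_run g N M l e 'E' hl_in he_in he_c huniqE]
            rw [jacobi_inv g N M hs_in (N * M) l hl_in,
                jacobi_inv g N M hl_in (N * M) e he_in]
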